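-- pv_equiv track=rewrite | github.com/ewoest/advent-of-code | 2023/day14/puzzle1.py | score_column
-- ===== SOURCE A (Python) =====
-- def score_column(matrix, x):
--     score = 0
--     lowest_open = None
--     num_rows = len(matrix)
--
--     for y in range(num_rows):
--         char = matrix[y][x]
--
--         if char == "." and lowest_open is None:
--             lowest_open = y
--         elif char == "#":
--             lowest_open = None
--         elif char == "O":
--             position = y
--             if lowest_open is not None:
--                 position = lowest_open
--                 lowest_open += 1
--             score += (num_rows - position)
--
--     return score
-- ===== SOURCE B (Python) =====
-- def score_column(matrix, x):
--     n = len(matrix)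
--     col = [row[x] for row in matrix]
--     total = 0
--     start = 0
--     while start <= n:
--         try:
--             end = col.index('#', start)
--         except ValueError:
--             end = n
--         total += _segment(col[start:end], start, n)
--         start = end + 1
--     return total
--
--
-- def _segment(seg, y, n):
--     # rocks before the first '.' stay put; the rest pack from the first '.' (closed form)
--     if '.' in seg:
--         b = seg.index('.')
--         m = seg[b:].count('O')
--         return _stay(seg[:b], y, n) + m * (n - (y + b)) - m * (m - 1) // 2
--     return _stay(seg, y, n)
--
--
-- def _stay(seg, y, n):
--     s = 0
--     for c in seg:
--         if c == 'O':
--             s += n - y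
--         y += 1
--     return s
-- ===== Notes on version B (the rewrite author's own statement) =====
-- stated objective: alternative
-- what changed: A simulates the column cell by cell with a moving 'lowest_open' cursor; B splits the column into maximal segments between '#' walls and scores each segment with a closed form: rocks before the segment's first '.' keep their row, the m rocks after it settle consecutively from the base, contributing m*(num_rows-base) - m*(m-1)//2.
import Mathlib
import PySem

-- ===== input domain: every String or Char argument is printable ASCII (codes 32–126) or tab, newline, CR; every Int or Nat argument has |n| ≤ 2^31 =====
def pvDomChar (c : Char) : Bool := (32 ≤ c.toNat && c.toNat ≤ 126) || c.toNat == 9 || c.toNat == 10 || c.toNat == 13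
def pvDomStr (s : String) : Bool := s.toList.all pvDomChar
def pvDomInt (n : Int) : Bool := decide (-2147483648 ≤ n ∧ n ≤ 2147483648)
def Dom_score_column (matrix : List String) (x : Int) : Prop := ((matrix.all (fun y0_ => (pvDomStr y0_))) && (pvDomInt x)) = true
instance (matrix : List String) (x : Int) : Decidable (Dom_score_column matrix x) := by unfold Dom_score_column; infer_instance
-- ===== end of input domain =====

-- B replaces A's single cursor-tracking scan by splitting the column at '#' walls and scoring
-- each wall-free segment with an arithmetic-series closed form (objective: alternative algorithm).

-- ===== PORT A =====
-- A's loop: for y in range(num_rows), char = matrix[y][x]; state = (score, lowest_open).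
-- The .getD defaults stand for Python's IndexError; Pre_score_column excludes those inputs.
def score_column (matrix : List String) (x : Int) : Int :=
  let numRows : Int := (matrix.length : Int)
  ((PySem.List.pyRange 0 numRows).foldl (fun (st : Int × Option Int) y =>
      let char : Char := (PySem.Str.pyGet? ((PySem.List.pyGet? matrix y).getD "") x).getD ' '
      if char = '.' ∧ st.2 = none then (st.1, some y)
      else if char = '#' then (st.1, none)
      else if char = 'O' then
        match st.2 with
        | some p => (st.1 + (numRows - p), some (p + 1))
        | none   => (st.1 + (numRows - y), none)
      else st) ((0 : Int), (none : Option Int))).1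

-- ===== PORT B =====
-- _stay: rocks that keep their own position (loop over seg with running row index)
def bStay (seg : List Char) (y : Int) (n : Int) : Int :=
  (seg.foldl (fun (st : Int × Int) c =>
      ((if c = 'O' then st.1 + (n - st.2) else st.1), st.2 + 1)) ((0 : Int), y)).1

-- _segment: closed-form score of one wall-free segment starting at absolute row y
def bSegment (seg : List Char) (y : Int) (n : Int) : Int :=
  match PySem.List.index? seg '.' with
  | some b =>
      let m : Int := ((PySem.List.slice seg (some (b : Int)) none).count 'O' : Nat)
      bStay (PySem.List.slice seg none (some (b : Int))) y n
        + m * (n - (y + (b : Int))) - PySem.Int.floordiv (m * (m - 1)) 2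
  | none => bStay seg y n

-- the while loop of B: cut the column at the next '#' (col.index('#', start) ported as an
-- offset search in col[start:], exact for 0 ≤ start) and add the segment's closed-form score
def bLoopAux (col : List Char) (n : Int) : Nat → Int → Int → Int
  | 0, _, total => total
  | fuel + 1, start, total =>
    if start ≤ n then
      let stop : Int :=
        match PySem.List.index? (PySem.List.slice col (some start) none) '#' with
        | some j => start + (j : Int)
        | none => n
      bLoopAux col n fuel (stop + 1)
        (total + bSegment (PySem.List.slice col (some start) (some stop)) start n)
    else total

def bLoop (col : List Char) (n : Int) (start : Int) (total : Int) : Int :=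
  bLoopAux col n (n + 1 - start).toNat start total

def score_column_alt (matrix : List String) (x : Int) : Int :=
  let n : Int := (matrix.length : Int)
  let col : List Char := matrix.map (fun row => (PySem.Str.pyGet? row x).getD ' ')
  bLoop col n 0 0

-- ===== PRECONDITION & SPEC =====
-- exactly the inputs where Python's matrix[y][x] never raises IndexError: x in range for every row
def Pre_score_column (matrix : List String) (x : Int) : Prop :=
  ∀ s ∈ matrix, PySem.Raise.InRange s.toList.length x
instance (matrix : List String) (x : Int) : Decidable (Pre_score_column matrix x) := by
  unfold Pre_score_column; infer_instance

def pvWitness_score_column : List String × Int := (["O.#", ".O.", "..O"], 1)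

def Spec_score_column (matrix : List String) (x : Int) (out : Int) : Prop := out = score_column_alt matrix x
instance (matrix : List String) (x : Int) (out : Int) : Decidable (Spec_score_column matrix x out) := by unfold Spec_score_column; infer_instance

-- ===== CLAIM (what is proved, stated in full; the proofs are below) =====
def Claim_equal_score_column : Prop := ∀ (matrix : List String) (x : Int), Dom_score_column matrix x → Pre_score_column matrix x → Spec_score_column matrix x (score_column matrix x)

-- ===== LEMMAS AND PROOFS =====

-- the body of A's loop, named (definitionally equal to the lambda inside score_column)
def aBody (matrix : List String) (x : Int) (st : Int × Option Int) (y : Int) : Int × Option Int :=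
  let char : Char := (PySem.Str.pyGet? ((PySem.List.pyGet? matrix y).getD "") x).getD ' '
  if char = '.' ∧ st.2 = none then (st.1, some y)
  else if char = '#' then (st.1, none)
  else if char = 'O' then
    match st.2 with
    | some p => (st.1 + ((matrix.length : Int) - p), some (p + 1))
    | none   => (st.1 + ((matrix.length : Int) - y), none)
  else st

lemma score_column_eq (matrix : List String) (x : Int) :
    score_column matrix x
    = ((PySem.List.pyRange 0 (matrix.length : Int)).foldl (aBody matrix x)
        ((0 : Int), (none : Option Int))).1 := rfl

-- the next wall is never before the cursor
lemma stop_ge (col : List Char) (n start : Int) (h : start ≤ n) :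
    start ≤ (match PySem.List.index? (PySem.List.slice col (some start) none) '#' with
             | some j => start + (j : Int)
             | none => n) := by
  cases PySem.List.index? (PySem.List.slice col (some start) none) '#' with
  | none => simpa using h
  | some j => simp

-- any sufficient fuel computes the same loop value
lemma bLoopAux_irrel (col : List Char) (n : Int) :
    ∀ (fuel fuel' : Nat) (start total : Int),
      (n + 1 - start).toNat ≤ fuel → (n + 1 - start).toNat ≤ fuel' →
      bLoopAux col n fuel start total = bLoopAux col n fuel' start total := by
  intro fuel
  induction fuel with
  | zero =>
    intro fuel' start total hf hf'
    have hns : ¬ start ≤ n := by omega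
    cases fuel' <;> simp [bLoopAux, hns]
  | succ fuel ih =>
    intro fuel' start total hf hf'
    cases fuel' with
    | zero =>
      have hns : ¬ start ≤ n := by omega
      simp [bLoopAux, hns]
    | succ fuel' =>
      simp only [bLoopAux]
      by_cases h : start ≤ n
      · rw [if_pos h, if_pos h]
        have hs := stop_ge col n start h
        apply ih <;> omega
      · rw [if_neg h, if_neg h]

-- the one-step unfolding of B's while loop
lemma bLoop_eq (col : List Char) (n start total : Int) :
    bLoop col n start total =
    if start ≤ n then
      let stop : Int :=
        match PySem.List.index? (PySem.List.slice col (some start) none) '#' with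
        | some j => start + (j : Int)
        | none => n
      bLoop col n (stop + 1)
        (total + bSegment (PySem.List.slice col (some start) (some stop)) start n)
    else total := by
  by_cases h : start ≤ n
  · rw [if_pos h]
    unfold bLoop
    have h1 : (n + 1 - start).toNat = (n + 1 - (start + 1)).toNat + 1 := by omega
    rw [h1]
    simp only [bLoopAux]
    rw [if_pos h]
    have hs := stop_ge col n start h
    apply bLoopAux_irrel <;> omega
  · rw [if_neg h]
    unfold bLoop
    cases hf : (n + 1 - start).toNat with
    | zero => rfl
    | succ m => simp [bLoopAux, h]

-- reference step function over the column, with the absolute row index threaded as state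
def aStep (n : Int) (st : Int × Int × Option Int) (c : Char) : Int × Int × Option Int :=
  if c = '.' ∧ st.2.2 = none then (st.1 + 1, st.2.1, some st.1)
  else if c = '#' then (st.1 + 1, st.2.1, none)
  else if c = 'O' then
    match st.2.2 with
    | some p => (st.1 + 1, st.2.1 + (n - p), some (p + 1))
    | none   => (st.1 + 1, st.2.1 + (n - st.1), st.2.2)
  else (st.1 + 1, st.2)

lemma aStep_fst (n : Int) (st : Int × Int × Option Int) (c : Char) :
    (aStep n st c).1 = st.1 + 1 := by
  obtain ⟨y, s, lo⟩ := st
  simp only [aStep]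
  split_ifs <;> try rfl
  cases lo <;> rfl

lemma aBody_step (matrix : List String) (x : Int) (st : Int × Option Int) (y : Int)
    (r : String) (hget : PySem.List.pyGet? matrix y = some r) :
    aBody matrix x st y
      = (aStep (matrix.length : Int) (y, st) ((PySem.Str.pyGet? r x).getD ' ')).2 := by
  obtain ⟨s, lo⟩ := st
  simp only [aBody, aStep, hget, Option.getD_some]
  split_ifs <;> try rfl
  all_goals cases lo <;> rfl

-- A's fold over range(num_rows) equals the aStep fold over the mapped column
lemma rangeFold (matrix : List String) (x : Int) :
    ∀ (pre suf : List String), matrix = pre ++ suf → ∀ (st : Int × Option Int),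
    (PySem.List.pyRange (pre.length : Int) (matrix.length : Int)).foldl (aBody matrix x) st
    = ((suf.map (fun row => (PySem.Str.pyGet? row x).getD ' ')).foldl
        (aStep (matrix.length : Int)) ((pre.length : Int), st)).2 := by
  intro pre suf
  induction suf generalizing pre with
  | nil =>
    intro hm st
    rw [PySem.List.pyRange_one_eq_nil (by simp [hm])]
    simp
  | cons r suf ih =>
    intro hm st
    have hlt : (pre.length : Int) < (matrix.length : Int) := by
      subst hm; simp
    have hget : PySem.List.pyGet? matrix (pre.length : Int) = some r := by
      rw [PySem.List.pyGet?_natCast]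
      subst hm; simp
    rw [PySem.List.pyRange_one_cons hlt]
    simp only [List.foldl_cons, List.map_cons]
    rw [aBody_step matrix x st (pre.length : Int) r hget]
    have hpair : aStep (matrix.length : Int) ((pre.length : Int), st) ((PySem.Str.pyGet? r x).getD ' ')
        = ((pre.length : Int) + 1,
           (aStep (matrix.length : Int) ((pre.length : Int), st) ((PySem.Str.pyGet? r x).getD ' ')).2) := by
      have he := Prod.mk.eta
        (p := aStep (matrix.length : Int) ((pre.length : Int), st) ((PySem.Str.pyGet? r x).getD ' '))
      rw [aStep_fst] at he
      exact he.symm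
    conv_rhs => rw [hpair]
    have hcast : (((pre ++ [r]).length : Nat) : Int) = (pre.length : Int) + 1 := by
      simp
    have h := ih (pre ++ [r]) (by simpa using hm)
    rw [hcast] at h
    exact h _

-- triangular numbers: sum of the offsets 0..m-1 of the settled rocks
def tri : Nat → Int
  | 0 => 0
  | m + 1 => tri m + m

lemma tri_eq_floordiv (m : Nat) : tri m = PySem.Int.floordiv ((m : Int) * ((m : Int) - 1)) 2 := by
  induction m with
  | zero =>
    rw [PySem.Int.floordiv_eq_ediv_of_pos (by norm_num : (0:Int) < 2)]
    simp [tri]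
  | succ m ih =>
    have h2 : (((m : Nat) + 1 : Nat) : Int) * ((((m : Nat) + 1 : Nat) : Int) - 1)
        = (m : Int) * ((m : Int) - 1) + (m : Int) * 2 := by push_cast; ring
    simp only [tri]
    rw [ih, h2, PySem.Int.floordiv_eq_ediv_of_pos (by norm_num : (0:Int) < 2),
        PySem.Int.floordiv_eq_ediv_of_pos (by norm_num : (0:Int) < 2),
        Int.add_mul_ediv_right _ _ (by norm_num : (2:Int) ≠ 0)]

-- bStay over a cons, via a fold invariant
lemma bStay_aux (n : Int) (seg : List Char) : ∀ (st : Int × Int),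
    (seg.foldl (fun (st : Int × Int) c =>
      ((if c = 'O' then st.1 + (n - st.2) else st.1), st.2 + 1)) st).1
    = st.1 + bStay seg st.2 n := by
  induction seg with
  | nil => intro st; simp [bStay]
  | cons c cs ih =>
    intro st
    rw [show bStay (c :: cs) st.2 n
        = ((c :: cs).foldl (fun (st : Int × Int) c =>
            ((if c = 'O' then st.1 + (n - st.2) else st.1), st.2 + 1)) (0, st.2)).1 from rfl]
    simp only [List.foldl_cons]
    rw [ih, ih]
    show (if c = 'O' then st.1 + (n - st.2) else st.1) + bStay cs (st.2 + 1) n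
        = st.1 + ((if c = 'O' then 0 + (n - st.2) else 0) + bStay cs (st.2 + 1) n)
    split_ifs <;> ring

lemma bStay_cons (n : Int) (c : Char) (cs : List Char) (y : Int) :
    bStay (c :: cs) y n = (if c = 'O' then n - y else 0) + bStay cs (y + 1) n := by
  calc bStay (c :: cs) y n
      = (cs.foldl (fun (st : Int × Int) c =>
          ((if c = 'O' then st.1 + (n - st.2) else st.1), st.2 + 1))
          ((if c = 'O' then 0 + (n - y) else 0), y + 1)).1 := rfl
    _ = (if c = 'O' then 0 + (n - y) else 0) + bStay cs (y + 1) n := bStay_aux n cs _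
    _ = (if c = 'O' then n - y else 0) + bStay cs (y + 1) n := by split_ifs <;> ring

-- phase after the base is found: every rock settles at the cursor
lemma fold_settled (n : Int) (seg : List Char) (hseg : '#' ∉ seg) (y s p : Int) :
    seg.foldl (aStep n) (y, s, some p)
    = (y + seg.length, s + (seg.count 'O' : Int) * (n - p) - tri (seg.count 'O'),
       some (p + seg.count 'O')) := by
  induction seg generalizing y s p with
  | nil => simp [tri]
  | cons c cs ih =>
    have hcs : '#' ∉ cs := fun h => hseg (List.mem_cons_of_mem _ h)
    have hc : c ≠ '#' := fun h => hseg (h ▸ List.mem_cons_self ..)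
    simp only [List.foldl_cons]
    by_cases h3 : c = 'O'
    · have hstep : aStep n (y, s, some p) c = (y + 1, s + (n - p), some (p + 1)) := by
        simp [aStep, h3]
      rw [hstep, ih hcs]
      have hcount : (c :: cs).count 'O' = cs.count 'O' + 1 := by
        simp [h3]
      rw [hcount]
      simp only [tri, Prod.mk.injEq, Option.some.injEq]
      and_intros <;> (push_cast [List.length_cons]; ring)
    · have hstep : aStep n (y, s, some p) c = (y + 1, s, some p) := by
        simp [aStep, h3, hc]
      rw [hstep, ih hcs]
      have hcount : (c :: cs).count 'O' = cs.count 'O' := by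
        simp [h3]
      rw [hcount]
      simp only [Prod.mk.injEq]
      and_intros <;> first | rfl | (push_cast [List.length_cons]; try ring)

-- phase before any '.': rocks stay at their own row (score = bStay)
lemma fold_stay (n : Int) (seg : List Char) (hh : '#' ∉ seg) (hd : '.' ∉ seg) (y s : Int) :
    seg.foldl (aStep n) (y, s, none)
    = (y + seg.length, s + bStay seg y n, none) := by
  induction seg generalizing y s with
  | nil => simp [bStay]
  | cons c cs ih =>
    have hcs : '#' ∉ cs := fun h => hh (List.mem_cons_of_mem _ h)
    have hds : '.' ∉ cs := fun h => hd (List.mem_cons_of_mem _ h)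
    have hc : c ≠ '#' := fun h => hh (h ▸ List.mem_cons_self ..)
    have hc2 : c ≠ '.' := fun h => hd (h ▸ List.mem_cons_self ..)
    simp only [List.foldl_cons]
    rw [bStay_cons]
    by_cases h3 : c = 'O'
    · have hstep : aStep n (y, s, none) c = (y + 1, s + (n - y), none) := by
        simp [aStep, h3]
      rw [hstep, ih hcs hds, if_pos h3]
      simp only [Prod.mk.injEq]
      and_intros <;> first | rfl | (push_cast [List.length_cons]; try ring)
    · have hstep : aStep n (y, s, none) c = (y + 1, s, none) := by
        simp [aStep, h3, hc, hc2]
      rw [hstep, ih hcs hds, if_neg h3]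
      simp only [Prod.mk.injEq]
      and_intros <;> first | rfl | (push_cast [List.length_cons]; try ring)

-- a whole wall-free segment, starting with no open cell, scores bSegment
lemma fold_segment (n : Int) (seg : List Char) (hh : '#' ∉ seg) (y s : Int) :
    ∃ lo, seg.foldl (aStep n) (y, s, none) = (y + seg.length, s + bSegment seg y n, lo) := by
  cases hidx : PySem.List.index? seg '.' with
  | none =>
    refine ⟨none, ?_⟩
    rw [fold_stay n seg hh ((PySem.List.index?_eq_none_iff seg '.').mp hidx) y s]
    simp only [bSegment, hidx]
  | some b =>
    obtain ⟨pre, suf, hdecomp, hlen, hnotin⟩ := (PySem.List.index?_eq_some_iff seg '.' b).mp hidx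
    subst hdecomp
    have hslice1 : PySem.List.slice (pre ++ '.' :: suf) none (some (b : Int)) = pre := by
      rw [PySem.List.slice_to_natCast, ← hlen, List.take_left]
    have hslice2 : PySem.List.slice (pre ++ '.' :: suf) (some (b : Int)) none = '.' :: suf := by
      rw [PySem.List.slice_from_natCast, ← hlen, List.drop_left]
    have hhp : '#' ∉ pre := fun h => hh (by simp [h])
    have hhs : '#' ∉ suf := fun h => hh (by simp [h])
    refine ⟨some (y + (b : Int) + suf.count 'O'), ?_⟩
    rw [List.foldl_append, fold_stay n pre hhp hnotin y s]
    simp only [List.foldl_cons]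
    have hstep : aStep n (y + (pre.length : Int), s + bStay pre y n, none) '.'
        = (y + (pre.length : Int) + 1, s + bStay pre y n, some (y + (pre.length : Int))) := by
      simp [aStep]
    rw [hstep, fold_settled n suf hhs]
    simp only [bSegment, hidx, hslice1, hslice2]
    have hcount : ('.' :: suf).count 'O' = suf.count 'O' := by simp
    rw [hcount, ← tri_eq_floordiv, ← hlen]
    simp only [Prod.mk.injEq]
    and_intros <;> first | rfl | (push_cast [List.length_cons, List.length_append]; try ring)

-- the composition over walls: the aStep fold over the tail equals B's while loop
lemma fold_eq_bLoop (col : List Char) (k : Nat) (hk : k ≤ col.length) (s : Int) :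
    ((col.drop k).foldl (aStep (col.length : Int)) ((k : Int), s, none)).2.1
    = bLoop col (col.length : Int) (k : Int) s := by
  rw [bLoop_eq]
  rw [if_pos (show (k : Int) ≤ (col.length : Int) by exact_mod_cast hk)]
  rw [PySem.List.slice_from_natCast]
  cases hidx : PySem.List.index? (col.drop k) '#' with
  | none =>
    have hno : '#' ∉ col.drop k := (PySem.List.index?_eq_none_iff _ '#').mp hidx
    obtain ⟨lo, hfold⟩ := fold_segment (col.length : Int) (col.drop k) hno (k : Int) s
    rw [hfold]
    dsimp only
    have hslice2 : PySem.List.slice col (some (k : Int)) (some ((col.length : Nat) : Int))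
        = col.drop k := by
      rw [PySem.List.slice_natCast]
      exact List.take_of_length_le (by simp)
    rw [hslice2]
    rw [bLoop_eq, if_neg (by omega)]
  | some j =>
    obtain ⟨pre, suf, hdecomp, hlen, hnotin⟩ :=
      (PySem.List.index?_eq_some_iff (col.drop k) '#' j).mp hidx
    have hlendrop : (col.drop k).length = col.length - k := by simp
    have hklen : k + j + 1 ≤ col.length := by
      rw [hdecomp] at hlendrop
      simp at hlendrop
      omega
    have hdropsuf : col.drop (k + j + 1) = suf := by
      have h1 : col.drop (k + j + 1) = (col.drop k).drop (j + 1) := by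
        rw [List.drop_drop]
        try congr 1
        try omega
      rw [h1, hdecomp, ← hlen,
          show pre.length + 1 = (pre ++ ['#']).length by simp,
          show pre ++ '#' :: suf = (pre ++ ['#']) ++ suf by simp]
      exact List.drop_left
    have hslice3 : PySem.List.slice col (some (k : Int)) (some ((k : Int) + (j : Int))) = pre := by
      rw [show (k : Int) + (j : Int) = (((k + j : Nat) : Nat) : Int) by push_cast; ring,
          PySem.List.slice_natCast]
      have h2 : k + j - k = j := by omega
      rw [h2, hdecomp, ← hlen]
      exact List.take_left' rfl
    rw [hdecomp, List.foldl_append]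
    obtain ⟨lo, hfold⟩ := fold_segment (col.length : Int) pre hnotin (k : Int) s
    rw [hfold]
    dsimp only
    simp only [List.foldl_cons]
    have hstep : aStep (col.length : Int)
        ((k : Int) + (pre.length : Int), s + bSegment pre (k : Int) (col.length : Int), lo) '#'
        = ((k : Int) + (pre.length : Int) + 1,
           s + bSegment pre (k : Int) (col.length : Int), none) := by
      cases lo <;> simp [aStep]
    rw [hstep]
    have hcast : (k : Int) + (pre.length : Int) + 1 = ((k + j + 1 : Nat) : Int) := by
      rw [hlen]; push_cast; ring
    rw [hcast, ← hdropsuf,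
        fold_eq_bLoop col (k + j + 1) hklen (s + bSegment pre (k : Int) (col.length : Int)),
        hslice3, show (k : Int) + (j : Int) + 1 = ((k + j + 1 : Nat) : Int) by push_cast; ring]
termination_by col.length - k
decreasing_by omega

-- ===== VERDICT (by name: the statement is the Claim_ definition above) =====
theorem score_column_spec : Claim_equal_score_column := by
  intro matrix x _ _
  unfold Spec_score_column
  rw [score_column_eq]
  have h0 := rangeFold matrix x [] matrix rfl ((0 : Int), (none : Option Int))
  simp only [List.length_nil, Nat.cast_zero] at h0
  rw [h0]
  have h1 := fold_eq_bLoop (matrix.map (fun row => (PySem.Str.pyGet? row x).getD ' ')) 0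
    (Nat.zero_le _) 0
  simp only [List.drop_zero, Nat.cast_zero, List.length_map] at h1
  simp only [score_column_alt]
  exact h1
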